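-- pv_equiv track=rewrite | github.com/glory-com/python_mid_exam | 半期考试3/02.py | num_dates
-- ===== SOURCE A (Python) =====
-- def num_dates(a):
--     #判断输入是否是列表
--     if not isinstance(a, list):
--         return None
--     #检查列表长度是否为0
--     if len(a) == 0:
--         return None
--     #检查列表中是否含有浮点数
--     for temp in a:
--         if not isinstance(temp, int):
--             return None
--
--     ans = []
--
--     for pos, temp in enumerate(a):
--         #用flag记录后面是否有比它大的数
--         flag = True
--         #循环后面每一个数
--         for i in range(pos + 1, len(a)):
--             if a[i] > temp:
--                 ans.append(i - pos)
--                 flag = False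
--                 break
--         #如果没有比它大的数，添加0
--         if flag:
--             ans.append(0)
--
--     return ans
-- ===== SOURCE B (Python) =====
-- def num_dates(a):
--     if not isinstance(a, list):
--         return None
--     if len(a) == 0:
--         return None
--     for temp in a:
--         if not isinstance(temp, int):
--             return None
--
--     ans = [0] * len(a)
--     stack = []  # indices whose next-greater element is not yet seen; values non-increasing bottom->top
--     for i, v in enumerate(a):
--         while stack and a[stack[-1]] < v:
--             j = stack.pop()
--             ans[j] = i - j
--         stack.append(i)
--     return ans
-- ===== Notes on version B (the rewrite author's own statement) =====
-- stated objective: faster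
-- what changed: Replaced the per-position forward rescan (nested loops) with a single left-to-right pass over a monotonic stack of pending indices, writing each distance into a preallocated result array when an index is popped.
import Mathlib
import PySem

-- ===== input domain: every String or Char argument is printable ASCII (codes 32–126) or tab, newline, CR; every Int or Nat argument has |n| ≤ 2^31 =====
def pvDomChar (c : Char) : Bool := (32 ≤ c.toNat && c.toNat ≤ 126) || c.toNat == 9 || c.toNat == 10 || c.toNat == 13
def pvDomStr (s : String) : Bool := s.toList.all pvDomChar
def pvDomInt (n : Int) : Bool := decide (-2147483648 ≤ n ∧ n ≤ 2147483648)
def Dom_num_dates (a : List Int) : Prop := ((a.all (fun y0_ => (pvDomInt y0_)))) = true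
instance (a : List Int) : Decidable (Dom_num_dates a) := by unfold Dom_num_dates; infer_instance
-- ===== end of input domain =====

-- B replaces A's per-position forward rescan with a single monotonic-stack pass (return value only; no mutation of the argument).

-- ===== PORT A =====
-- inner loop 'for i in range(pos+1, len(a)): if a[i] > temp: … break' — break encoded as Option (some (i - pos) = appended distance, none = flag stayed True)
def aScan (a : List Int) (pos temp : Int) : List Int → Option Int
  | [] => none
  | i :: rest => if temp < PySem.List.pyGetD a i 0 then some (i - pos) else aScan a pos temp rest

def num_dates (a : List Int) : Option (List Int) :=
  if a.length = 0 then none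
  else
    some ((PySem.List.enumerate a 0).foldl
      (fun ans pt =>
        match aScan a pt.1 pt.2 (PySem.List.pyRange (pt.1 + 1) a.length 1) with
        | some d => ans ++ [d]
        | none => ans ++ [0]) [])

-- ===== PORT B =====
-- 'while stack and a[stack[-1]] < v: j = stack.pop(); ans[j] = i - j' — stack head = Python stack[-1]
def bPop (a : List Int) (i v : Int) : List Int → List Int → List Int × List Int
  | [], ans => (ans, [])
  | j :: rest, ans =>
    if PySem.List.pyGetD a j 0 < v then
      bPop a i v rest (PySem.List.pySetD ans j (i - j))
    else (ans, j :: rest)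

def num_dates_alt (a : List Int) : Option (List Int) :=
  if a.length = 0 then none
  else
    some (((PySem.List.enumerate a 0).foldl
      (fun st p =>
        let q := bPop a p.1 p.2 st.2 st.1
        (q.1, p.1 :: q.2))
      (List.replicate a.length 0, [])).1)

-- ===== PRECONDITION & SPEC =====
def Spec_num_dates (a : List Int) (out : Option (List Int)) : Prop := out = num_dates_alt a
instance (a : List Int) (out : Option (List Int)) : Decidable (Spec_num_dates a out) := by unfold Spec_num_dates; infer_instance

-- ===== CLAIM (what is proved, stated in full; the proofs are below) =====
def Claim_equal_num_dates : Prop := ∀ (a : List Int), Dom_num_dates a → Spec_num_dates a (num_dates a)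

-- ===== LEMMAS AND PROOFS =====

-- the common specification: distance to the first strictly greater element to the right, 0 if none
def firstG (a : List Int) (j : Int) : Option Int :=
  (PySem.List.pyRange (j + 1) a.length 1).find? (fun i => decide (PySem.List.pyGetD a j 0 < PySem.List.pyGetD a i 0))

def specVal (a : List Int) (j : Int) : Int :=
  match firstG a j with
  | some i => i - j
  | none => 0

def specList (a : List Int) : List Int :=
  (PySem.List.pyRange 0 a.length 1).map (specVal a)

theorem aScan_eq_find? (a : List Int) (pos temp : Int) (l : List Int) :
    aScan a pos temp l = (l.find? (fun i => decide (temp < PySem.List.pyGetD a i 0))).map (fun i => i - pos) := by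
  induction l with
  | nil => rfl
  | cons i rest ih =>
    simp only [aScan, List.find?]
    by_cases h : temp < PySem.List.pyGetD a i 0 <;> simp [h, ih]

theorem foldl_g (a : List Int) (l : List Int) (acc : List Int) :
    l.foldl (fun ans j =>
        match aScan a j (PySem.List.pyGetD a j 0) (PySem.List.pyRange (j + 1) a.length 1) with
        | some d => ans ++ [d]
        | none => ans ++ [0]) acc
    = acc ++ l.map (specVal a) := by
  induction l generalizing acc with
  | nil => simp
  | cons j rest ih =>
    simp only [List.foldl_cons, List.map_cons]
    rw [aScan_eq_find?]
    have hv : specVal a j = match firstG a j with | some i => i - j | none => 0 := rfl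
    unfold firstG at hv
    cases hf : (PySem.List.pyRange (j + 1) a.length 1).find?
        (fun i => decide (PySem.List.pyGetD a j 0 < PySem.List.pyGetD a i 0)) <;>
      simp [hf, ih, hv]

theorem num_dates_eq_spec (a : List Int) (h : a.length ≠ 0) :
    num_dates a = some (specList a) := by
  unfold num_dates
  rw [if_neg h, PySem.List.enumerate_eq_map_pyRange (d := 0), List.foldl_map]
  refine congrArg some ((foldl_g a _ []).trans ?_)
  simp [specList, PySem.List.len]

theorem pyGetD_pySetD (ans : List Int) (j m v : Int) (hj : 0 ≤ j)
    (hjl : j < (ans.length : Int)) (hm : 0 ≤ m) :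
    PySem.List.pyGetD (PySem.List.pySetD ans j v) m 0
      = if m = j then v else PySem.List.pyGetD ans m 0 := by
  rw [PySem.List.pySetD_of_nonneg ans v hj, PySem.List.pyGetD_of_nonneg _ 0 hm,
    PySem.List.pyGetD_of_nonneg _ 0 hm]
  have hjn : j.toNat < ans.length := by omega
  by_cases hmj : m = j
  · subst hmj
    simp [List.getD, hjn]
  · have hne : m.toNat ≠ j.toNat := by omega
    simp [List.getD, Ne.symm hne, hmj]

theorem firstG_eq_some (a : List Int) (j k : Int) (hjk : j < k)
    (hk : k < (a.length : Int))
    (hp : PySem.List.pyGetD a j 0 < PySem.List.pyGetD a k 0)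
    (hmid : ∀ m : Int, j < m → m < k → PySem.List.pyGetD a m 0 ≤ PySem.List.pyGetD a j 0) :
    firstG a j = some k := by
  unfold firstG
  rw [PySem.List.pyRange_one_append (j + 1) k (a.length : Int) (by omega) (by omega),
    List.find?_append]
  have h1 : (PySem.List.pyRange (j + 1) k 1).find?
      (fun i => decide (PySem.List.pyGetD a j 0 < PySem.List.pyGetD a i 0)) = none := by
    rw [List.find?_eq_none]
    intro x hx
    rw [PySem.List.mem_pyRange_one] at hx
    simp only [decide_eq_true_eq, not_lt]
    exact hmid x (by omega) (by omega)
  rw [h1, PySem.List.pyRange_one_cons hk, Option.none_or,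
    List.find?_cons_of_pos (by simpa using hp)]

theorem firstG_eq_none (a : List Int) (j : Int)
    (hmid : ∀ m : Int, j < m → m < (a.length : Int) →
      PySem.List.pyGetD a m 0 ≤ PySem.List.pyGetD a j 0) :
    firstG a j = none := by
  unfold firstG
  rw [List.find?_eq_none]
  intro x hx
  rw [PySem.List.mem_pyRange_one] at hx
  simp only [decide_eq_true_eq, not_lt]
  exact hmid x (by omega) (by omega)

theorem bPop_spec (a : List Int) (k v : Int) :
    ∀ (stack ans : List Int),
    stack.Pairwise (fun x y => y < x) →
    (∀ j ∈ stack, 0 ≤ j ∧ j < (ans.length : Int)) →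
    ∃ popped,
      stack = popped ++ (bPop a k v stack ans).2 ∧
      (∀ j ∈ popped, PySem.List.pyGetD a j 0 < v) ∧
      (∀ hd, (bPop a k v stack ans).2.head? = some hd → ¬ PySem.List.pyGetD a hd 0 < v) ∧
      (bPop a k v stack ans).1.length = ans.length ∧
      (∀ j ∈ popped, PySem.List.pyGetD (bPop a k v stack ans).1 j 0 = k - j) ∧
      (∀ m : Int, 0 ≤ m → m ∉ popped →
        PySem.List.pyGetD (bPop a k v stack ans).1 m 0 = PySem.List.pyGetD ans m 0) := by
  intro stack
  induction stack with
  | nil =>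
    intro ans _ _
    exact ⟨[], by simp [bPop]⟩
  | cons j rest ih =>
    intro ans hpw hb
    by_cases hc : PySem.List.pyGetD a j 0 < v
    · have hbnd := hb j (by simp)
      have hrec := ih (PySem.List.pySetD ans j (k - j))
        (hpw.sublist (List.sublist_cons_self j rest))
        (by
          intro x hx
          have := hb x (List.mem_cons_of_mem _ hx)
          rwa [PySem.List.length_pySetD])
      obtain ⟨popped', heq, hlt, hhd, hlen, hset, hkeep⟩ := hrec
      have hbp : bPop a k v (j :: rest) ans
          = bPop a k v rest (PySem.List.pySetD ans j (k - j)) := by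
        simp [bPop, hc]
      have hjrest : j ∉ rest := by
        intro hmem
        have := (List.pairwise_cons.mp hpw).1 j hmem
        omega
      have hjpop : j ∉ popped' := fun hmem => hjrest (heq ▸ List.mem_append_left _ hmem)
      refine ⟨j :: popped', ?_, ?_, ?_, ?_, ?_, ?_⟩
      · rw [hbp, List.cons_append, ← heq]
      · intro x hx
        rcases List.mem_cons.mp hx with h | h
        · subst h; exact hc
        · exact hlt x h
      · rw [hbp]; exact hhd
      · rw [hbp, hlen, PySem.List.length_pySetD]
      · intro x hx
        rcases List.mem_cons.mp hx with h | h
        · subst h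
          rw [hbp, hkeep x hbnd.1 hjpop,
            pyGetD_pySetD ans x x (k - x) hbnd.1 hbnd.2 hbnd.1]
          simp
        · rw [hbp]; exact hset x h
      · intro m hm hmn
        rw [hbp, hkeep m hm (fun h => hmn (List.mem_cons_of_mem _ h)),
          pyGetD_pySetD ans j m (k - j) hbnd.1 hbnd.2 hm]
        have hne : m ≠ j := by intro e; exact hmn (by simp [e])
        simp [hne]
    · exact ⟨[], by simp [bPop, hc], by simp, by
        intro hd hhd
        simp only [bPop, hc, if_false] at hhd
        simp at hhd
        rw [← hhd]
        exact hc, by simp [bPop, hc], by simp, by simp [bPop, hc]⟩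

-- the loop invariant after processing the first k elements
def LoopInv (a : List Int) (k : Int) (ans stack : List Int) : Prop :=
  ans.length = a.length ∧
  stack.Pairwise (fun x y => y < x ∧ PySem.List.pyGetD a x 0 ≤ PySem.List.pyGetD a y 0) ∧
  (∀ j ∈ stack, 0 ≤ j ∧ j < k ∧
    ∀ i : Int, j < i → i < k → PySem.List.pyGetD a i 0 ≤ PySem.List.pyGetD a j 0) ∧
  (∀ j ∈ stack, PySem.List.pyGetD ans j 0 = 0) ∧
  (∀ j : Int, 0 ≤ j → j < k → j ∉ stack → PySem.List.pyGetD ans j 0 = specVal a j) ∧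
  (∀ j : Int, k ≤ j → PySem.List.pyGetD ans j 0 = 0)

theorem step_spec (a : List Int) (k : Int) (ans stack : List Int) (h0 : 0 ≤ k)
    (hk : k < (a.length : Int)) (hinv : LoopInv a k ans stack) :
    LoopInv a (k + 1) (bPop a k (PySem.List.pyGetD a k 0) stack ans).1
      (k :: (bPop a k (PySem.List.pyGetD a k 0) stack ans).2) := by
  obtain ⟨hI1, hI2, hI3, hI4, hI5, hI6⟩ := hinv
  have hpw' : stack.Pairwise (fun x y => y < x) := hI2.imp (fun h => h.1)
  have hb : ∀ j ∈ stack, 0 ≤ j ∧ j < (ans.length : Int) := by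
    intro j hj
    have h3 := hI3 j hj
    refine ⟨h3.1, ?_⟩
    rw [hI1]; omega
  obtain ⟨popped, heq, hlt, hhd, hlen, hset, hkeep⟩ :=
    bPop_spec a k (PySem.List.pyGetD a k 0) stack ans hpw' hb
  set q := bPop a k (PySem.List.pyGetD a k 0) stack ans with hq
  have hsub : ∀ x ∈ q.2, x ∈ stack := fun x hx => heq ▸ List.mem_append_right _ hx
  have hpopmem : ∀ x ∈ popped, x ∈ stack := fun x hx => heq ▸ List.mem_append_left _ hx
  have hpoplt : ∀ x ∈ popped, x < k := fun x hx => (hI3 x (hpopmem x hx)).2.1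
  have hnodup : stack.Nodup := hpw'.imp (fun h => by omega)
  have hdisj : ∀ x ∈ q.2, x ∉ popped := by
    intro x hx hxp
    have := List.nodup_append.mp (heq ▸ hnodup)
    exact this.2.2 x hxp x hx rfl
  have hq2pw : q.2.Pairwise
      (fun x y => y < x ∧ PySem.List.pyGetD a x 0 ≤ PySem.List.pyGetD a y 0) :=
    List.Pairwise.sublist (heq ▸ List.sublist_append_right popped q.2) hI2
  have hge : ∀ y ∈ q.2, PySem.List.pyGetD a k 0 ≤ PySem.List.pyGetD a y 0 := by
    cases hq2 : q.2 with
    | nil => intro y hy; simp at hy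
    | cons hd tl =>
      intro y hy
      have hhd' : ¬ PySem.List.pyGetD a hd 0 < PySem.List.pyGetD a k 0 :=
        hhd hd (by rw [hq2]; rfl)
      rcases List.mem_cons.mp hy with h | h
      · subst h; omega
      · have := (List.pairwise_cons.mp (hq2 ▸ hq2pw)).1 y h
        omega
  refine ⟨by rw [hlen, hI1], ?_, ?_, ?_, ?_, ?_⟩
  · rw [List.pairwise_cons]
    refine ⟨fun y hy => ⟨(hI3 y (hsub y hy)).2.1, hge y hy⟩, hq2pw⟩
  · intro j hj
    rcases List.mem_cons.mp hj with h | h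
    · subst h
      exact ⟨h0, by omega, fun i hi1 hi2 => absurd hi2 (by omega)⟩
    · have old := hI3 j (hsub j h)
      refine ⟨old.1, by omega, ?_⟩
      intro i hi1 hi2
      by_cases hik : i < k
      · exact old.2.2 i hi1 hik
      · have : i = k := by omega
        subst this
        exact hge j h
  · intro j hj
    rcases List.mem_cons.mp hj with h | h
    · subst h
      have hknp : j ∉ popped := fun hp => absurd (hpoplt j hp) (by omega)
      rw [hkeep j h0 hknp]
      exact hI6 j le_rfl
    · rw [hkeep j (hI3 j (hsub j h)).1 (hdisj j h)]
      exact hI4 j (hsub j h)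
  · intro j hj0 hjk1 hjnotin
    have hjne : j ≠ k := fun e => hjnotin (by simp [e])
    have hjq2 : j ∉ q.2 := fun hm => hjnotin (List.mem_cons_of_mem _ hm)
    by_cases hp : j ∈ popped
    · rw [hset j hp]
      unfold specVal
      rw [firstG_eq_some a j k (hpoplt j hp) hk (hlt j hp)
        (fun m h1 h2 => (hI3 j (hpopmem j hp)).2.2 m h1 h2)]
    · rw [hkeep j hj0 hp]
      refine hI5 j hj0 (by omega) ?_
      intro hm
      rcases List.mem_append.mp (heq ▸ hm) with h | h
      · exact hp h
      · exact hjq2 h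
  · intro j hjk1
    have hjp : j ∉ popped := fun hp => absurd (hpoplt j hp) (by omega)
    rw [hkeep j (by omega) hjp]
    exact hI6 j (by omega)

theorem loop_spec (a : List Int) :
    ∀ (t : List Int) (k : Int) (ans stack : List Int),
    0 ≤ k → k + t.length = (a.length : Int) →
    (∀ (m : Nat) (hm : m < t.length), t[m] = PySem.List.pyGetD a (k + m) 0) →
    LoopInv a k ans stack →
    LoopInv a (a.length : Int)
      ((PySem.List.enumerate t k).foldl
        (fun st p =>
          let q := bPop a p.1 p.2 st.2 st.1
          (q.1, p.1 :: q.2)) (ans, stack)).1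
      ((PySem.List.enumerate t k).foldl
        (fun st p =>
          let q := bPop a p.1 p.2 st.2 st.1
          (q.1, p.1 :: q.2)) (ans, stack)).2 := by
  intro t
  induction t with
  | nil =>
    intro k ans stack h0 hlen _ hinv
    simp only [PySem.List.enumerate_nil, List.foldl_nil]
    have : k = (a.length : Int) := by simpa using hlen
    rwa [this] at hinv
  | cons x t' ih =>
    intro k ans stack h0 hlen hget hinv
    rw [PySem.List.enumerate_cons, List.foldl_cons]
    have hx : x = PySem.List.pyGetD a (k + (0 : Nat)) 0 := hget 0 (by simp)
    have hkn : k < (a.length : Int) := by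
      have := hlen; simp only [List.length_cons] at this; push_cast at this; omega
    have hstep := step_spec a k ans stack h0 hkn hinv
    have := ih (k + 1) (bPop a k (PySem.List.pyGetD a k 0) stack ans).1
      (k :: (bPop a k (PySem.List.pyGetD a k 0) stack ans).2)
      (by omega)
      (by have := hlen; simp only [List.length_cons] at this; push_cast at this ⊢; omega)
      (by
        intro m hm
        have := hget (m + 1) (by simpa using Nat.succ_lt_succ hm)
        simpa [add_assoc, add_comm, add_left_comm] using this)
      hstep
    have hxv : x = PySem.List.pyGetD a k 0 := by simpa using hx
    rw [hxv]
    exact this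

theorem num_dates_alt_eq_spec (a : List Int) (h : a.length ≠ 0) :
    num_dates_alt a = some (specList a) := by
  unfold num_dates_alt
  rw [if_neg h]
  have hinv0 : LoopInv a 0 (List.replicate a.length 0) [] := by
    refine ⟨by simp, by simp, by simp, by simp,
      (by intro j hj0 hj1 _; omega), ?_⟩
    intro j hj
    rw [PySem.List.pyGetD_of_nonneg _ 0 hj]
    rcases lt_or_ge j.toNat a.length with hlt | hge
    · simp [List.getD, hlt]
    · have hnone : (List.replicate a.length (0 : Int))[j.toNat]? = none := List.getElem?_eq_none_iff.mpr (by simpa using hge)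
      simp [List.getD, hnone]
  have hfin := loop_spec a a 0 (List.replicate a.length 0) [] le_rfl (by simp)
    (by
      intro m hm
      rw [show (0 : Int) + (m : Nat) = ((m : Nat) : Int) by ring,
        PySem.List.pyGetD_natCast]
      simp [List.getD, List.getElem?_eq_getElem hm])
    hinv0
  set F := (PySem.List.enumerate a 0).foldl
      (fun st p =>
        let q := bPop a p.1 p.2 st.2 st.1
        (q.1, p.1 :: q.2)) (List.replicate a.length 0, []) with hF
  obtain ⟨hI1, _, hI3, hI4, hI5, _⟩ := hfin
  refine congrArg some (List.ext_getElem ?_ ?_)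
  · rw [hI1]
    simp [specList, PySem.List.length_pyRange_one]
  · intro i h1 h2
    have hilen : i < a.length := by rw [← hI1]; exact h1
    have hval : PySem.List.pyGetD F.1 (i : Int) 0 = specVal a (i : Int) := by
      by_cases hmem : ((i : Nat) : Int) ∈ F.2
      · rw [hI4 _ hmem]
        unfold specVal
        rw [firstG_eq_none a (i : Int) (fun m hm1 hm2 => (hI3 _ hmem).2.2 m hm1 hm2)]
      · exact hI5 (i : Int) (by positivity) (by exact_mod_cast hilen) hmem
    have hRHS : (specList a)[i]'h2 = specVal a (i : Int) := by
      simp [specList, PySem.List.getElem_pyRange_one]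
    rw [hRHS, ← hval, PySem.List.pyGetD_natCast]
    simp [List.getD, List.getElem?_eq_getElem h1]

-- ===== VERDICT (by name: the statement is the Claim_ definition above) =====
theorem num_dates_spec : Claim_equal_num_dates := by
  intro a _
  unfold Spec_num_dates
  by_cases h : a.length = 0
  · simp [num_dates, num_dates_alt, h]
  · rw [num_dates_eq_spec a h, num_dates_alt_eq_spec a h]
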